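-- pv_equiv track=rewrite | github.com/cpatdowling/peakload | src/python/integer_program_expectation.py | all_modes
-- ===== SOURCE A (Python) =====
-- def all_modes(arr):
--     out = {}
--     for i in range(len(arr)):
--         if arr[i] not in out:
--             out[arr[i]] = 1
--         else:
--             out[arr[i]] += 1
--     sorted_modes = [tup[0] for tup in sorted(out.items(), key = lambda x : x[1], reverse=True)]
--     return(sorted_modes)
-- ===== SOURCE B (Python) =====
-- def all_modes(arr):
--     counts = {}
--     for x in arr:
--         counts[x] = counts.get(x, 0) + 1
--     if not counts:
--         return []
--     m = max(counts.values())
--     buckets = [[] for _ in range(m + 1)]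
--     for v, c in counts.items():
--         buckets[c].append(v)
--     res = []
--     for c in range(m, 0, -1):
--         res += buckets[c]
--     return res
-- ===== Notes on version B (the rewrite author's own statement) =====
-- stated objective: alternative
-- what changed: Replaces the comparison sort of (value,count) pairs by a counting/bucket sort: values are dropped into buckets indexed by their frequency (in insertion order) and the buckets are emitted from highest frequency down.
import Mathlib
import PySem

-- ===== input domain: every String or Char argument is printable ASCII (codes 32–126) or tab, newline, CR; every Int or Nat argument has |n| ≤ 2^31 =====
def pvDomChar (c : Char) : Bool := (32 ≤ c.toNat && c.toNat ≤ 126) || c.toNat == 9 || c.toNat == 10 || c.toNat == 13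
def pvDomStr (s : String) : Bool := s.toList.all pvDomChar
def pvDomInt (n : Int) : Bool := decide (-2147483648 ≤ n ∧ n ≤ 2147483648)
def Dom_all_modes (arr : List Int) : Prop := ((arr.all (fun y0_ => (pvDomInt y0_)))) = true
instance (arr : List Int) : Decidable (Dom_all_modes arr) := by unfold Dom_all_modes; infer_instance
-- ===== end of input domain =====

-- B replaces A's comparison sort of (value, count) pairs by a counting/bucket sort keyed on the
-- frequency (buckets filled in insertion order, emitted from highest frequency down); same result.

-- ===== PORT A =====
def all_modes (arr : List Int) : List Int :=
  let out := (PySem.List.pyRange 0 (arr.length : Int) 1).foldl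
    (fun d i =>
      if !(d.contains (PySem.List.pyGetD arr i 0)) then d.insert (PySem.List.pyGetD arr i 0) 1
      else d.insert (PySem.List.pyGetD arr i 0) (d.getD (PySem.List.pyGetD arr i 0) 0 + 1))
    (PySem.Dict.empty : PySem.Dict Int Int)
  (PySem.List.sorted out.items (fun t => t.2) true).map (fun t => t.1)

-- ===== PORT B =====
def all_modes_alt (arr : List Int) : List Int :=
  let counts := arr.foldl (fun d x => d.insert x (d.getD x 0 + 1)) (PySem.Dict.empty : PySem.Dict Int Int)
  -- 'if not counts: return []' then 'm = max(counts.values())': max? is none exactly when counts is empty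
  match PySem.List.max? counts.values (fun v => v) with
  | none => []
  | some m =>
    -- buckets = [[] for _ in range(m+1)]; buckets[c].append(v).  The indices c are the counts,
    -- always 0 ≤ c ≤ m here, so List.set/getD at c.toNat is exact for Python's buckets[c].
    let buckets := counts.items.foldl
      (fun bs p => bs.set p.2.toNat (bs.getD p.2.toNat [] ++ [p.1]))
      (List.replicate (m + 1).toNat ([] : List Int))
    (PySem.List.pyRange m 0 (-1)).foldl (fun res c => res ++ buckets.getD c.toNat []) []


-- ===== PRECONDITION & SPEC =====
def Spec_all_modes (arr : List Int) (out : List Int) : Prop := out = all_modes_alt arr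
instance (arr : List Int) (out : List Int) : Decidable (Spec_all_modes arr out) := by unfold Spec_all_modes; infer_instance

-- ===== CLAIM (what is proved, stated in full; the proofs are below) =====
def Claim_equal_all_modes : Prop := ∀ (arr : List Int), Dom_all_modes arr → Spec_all_modes arr (all_modes arr)

-- ===== LEMMAS AND PROOFS =====

lemma getD_zero_of_not_contains (d : PySem.Dict Int Int) (x : Int)
    (h : d.contains x = false) : d.getD x 0 = 0 := by
  simp [PySem.Dict.contains, List.any_eq_false] at h
  have hf : List.find? (fun p => p.1 == x) d.items = none := by
    rw [List.find?_eq_none]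
    intro p hp
    simpa using h p.1 p.2 hp
  simp [PySem.Dict.getD, PySem.Dict.get?, hf]

lemma insertBy_cons {α : Type} (before : α → α → Bool) (x y : α) (ys : List α) :
    PySem.List.insertBy before x (y :: ys)
      = if before x y then x :: y :: ys else y :: PySem.List.insertBy before x ys := rfl

lemma insertBy_front {α : Type} (before : α → α → Bool) (x : α) (ys : List α)
    (h : ∀ y ∈ ys, before x y = true) :
    PySem.List.insertBy before x ys = x :: ys := by
  cases ys with
  | nil => rfl
  | cons y t => simp [insertBy_cons, h y (by simp)]

lemma insertBy_skip {α : Type} (before : α → α → Bool) (x : α) (l r : List α)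
    (h : ∀ y ∈ l, before x y = false) :
    PySem.List.insertBy before x (l ++ r) = l ++ PySem.List.insertBy before x r := by
  induction l with
  | nil => rfl
  | cons y t ih =>
      rw [List.cons_append, insertBy_cons, if_neg (by simp [h y (by simp)]),
        ih (fun z hz => h z (by simp [hz])), List.cons_append]

lemma branch_fold_eq (d : PySem.Dict Int Int) (x : Int) :
    (if !(d.contains x) then d.insert x 1 else d.insert x (d.getD x 0 + 1))
      = d.insert x (d.getD x 0 + 1) := by
  cases h : d.contains x with
  | true => simp [h]
  | false => simp [h, getD_zero_of_not_contains d x h]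

lemma insertBy_groups {α : Type} (key : α → Int) (x : α) (ks : List Int) (g : Int → List α)
    (hg : ∀ c ∈ ks, ∀ a ∈ g c, key a = c)
    (hks : ks.Pairwise (· > ·)) (hx : key x ∈ ks) :
    PySem.List.insertBy (fun a b => decide (key b < key a)) x (ks.flatMap g)
      = ks.flatMap (fun c => g c ++ if key x = c then [x] else []) := by
  induction ks with
  | nil => simp at hx
  | cons c ks ih =>
      have hhead : ∀ c' ∈ ks, c > c' := fun c' hc' => (List.pairwise_cons.1 hks).1 c' hc'
      rw [List.flatMap_cons, List.flatMap_cons]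
      by_cases hceq : key x = c
      · -- insert right after the group of c
        have hskip : ∀ y ∈ g c, (fun a b => decide (key b < key a)) x y = false := by
          intro y hy
          simp [hg c (by simp) y hy, hceq]
        rw [insertBy_skip _ _ _ _ hskip]
        have hfront : ∀ y ∈ ks.flatMap g, (fun a b => decide (key b < key a)) x y = true := by
          intro y hy
          rcases List.mem_flatMap.1 hy with ⟨c', hc', hyc'⟩
          have := hg c' (by simp [hc']) y hyc'
          simp [this, hceq]
          exact hhead c' hc'
        rw [insertBy_front _ _ _ hfront]
        have hrest : ks.flatMap (fun c' => g c' ++ if key x = c' then [x] else []) = ks.flatMap g := by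
          apply List.flatMap_congr
          intro c' hc'
          have : key x ≠ c' := by have := hhead c' hc'; omega
          simp [this]
        rw [hrest, if_pos hceq]
        simp
      · have hx' : key x ∈ ks := by
          rcases List.mem_cons.1 hx with h | h
          · exact absurd h hceq
          · exact h
        have hskip : ∀ y ∈ g c, (fun a b => decide (key b < key a)) x y = false := by
          intro y hy
          have hky := hg c (by simp) y hy
          have : c > key x := hhead _ hx'
          simp [hky]; omega
        rw [insertBy_skip _ _ _ _ hskip,
          ih (fun c' hc' => hg c' (by simp [hc'])) (List.pairwise_cons.1 hks).2 hx', if_neg hceq]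
        simp

lemma sorted_rev_eq_flatMap {α : Type} (xs : List α) (key : α → Int) (ks : List Int)
    (hks : ks.Pairwise (· > ·)) (hmem : ∀ a ∈ xs, key a ∈ ks) :
    PySem.List.sorted xs key true
      = ks.flatMap (fun c => xs.filter (fun a => key a == c)) := by
  induction xs using List.reverseRecOn with
  | nil => simp [PySem.List.sorted]
  | append_singleton l x ih =>
      rw [PySem.List.sorted_rev_eq_foldl_insertBy, List.foldl_append, List.foldl_cons, List.foldl_nil,
        ← PySem.List.sorted_rev_eq_foldl_insertBy,
        ih (fun a ha => hmem a (by simp [ha]))]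
      rw [insertBy_groups key x ks _
        (fun c hc a ha => by simpa using (List.mem_filter.1 ha).2)
        hks (hmem x (by simp))]
      apply List.flatMap_congr
      intro c hc
      simp only [List.filter_append, List.filter_cons, List.filter_nil]
      by_cases h : key x = c <;> simp [h]

lemma bucket_fold (ps : List (Int × Int)) :
    ∀ (bs : List (List Int)) (c : Int), 0 ≤ c → c.toNat < bs.length →
    (∀ p ∈ ps, 0 ≤ p.2 ∧ p.2.toNat < bs.length) →
    (ps.foldl (fun bs p => bs.set p.2.toNat (bs.getD p.2.toNat [] ++ [p.1])) bs).getD c.toNat []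
      = bs.getD c.toNat [] ++ (ps.filter (fun p => p.2 == c)).map (fun p => p.1) := by
  induction ps with
  | nil => intro bs c _ _ _; simp
  | cons p ps ih =>
      intro bs c hc hlt hps
      rw [List.foldl_cons]
      have hp := hps p (by simp)
      have hlen : (bs.set p.2.toNat (bs.getD p.2.toNat [] ++ [p.1])).length = bs.length :=
        List.length_set ..
      rw [ih _ c hc (by rw [hlen]; exact hlt)
        (fun q hq => by rw [hlen]; exact hps q (by simp [hq]))]
      rw [List.filter_cons]
      by_cases heq : p.2 = c
      · have htn : p.2.toNat = c.toNat := by rw [heq]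
        rw [List.getD_eq_getElem?_getD, List.getElem?_set, if_pos htn, if_pos (htn ▸ hlt)]
        simp [heq, List.getD_eq_getElem?_getD]
      · have htn : p.2.toNat ≠ c.toNat := by omega
        rw [List.getD_eq_getElem?_getD, List.getElem?_set, if_neg htn]
        simp [heq, List.getD_eq_getElem?_getD]

lemma all_modes_eq_counter (arr : List Int) :
    all_modes arr
      = (PySem.List.sorted (PySem.Dict.counter arr).items (fun t => t.2) true).map (fun t => t.1) := by
  have h1 : (PySem.List.pyRange 0 (arr.length : Int) 1).foldl
      (fun d i =>
        if !(d.contains (PySem.List.pyGetD arr i 0)) then d.insert (PySem.List.pyGetD arr i 0) 1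
        else d.insert (PySem.List.pyGetD arr i 0) (d.getD (PySem.List.pyGetD arr i 0) 0 + 1))
      (PySem.Dict.empty : PySem.Dict Int Int)
      = arr.foldl (fun d x => if !(d.contains x) then d.insert x 1 else d.insert x (d.getD x 0 + 1))
        PySem.Dict.empty :=
    PySem.List.foldl_pyRange_zero_pyGetD' arr 0
      (fun (d : PySem.Dict Int Int) x => if !(d.contains x) then d.insert x 1 else d.insert x (d.getD x 0 + 1))
      PySem.Dict.empty
  have h2 : (fun (d : PySem.Dict Int Int) (x : Int) =>
      if !(d.contains x) then d.insert x 1 else d.insert x (d.getD x 0 + 1))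
      = fun d x => d.insert x (d.getD x 0 + 1) :=
    funext fun d => funext fun x => branch_fold_eq d x
  have h3 : (PySem.List.pyRange 0 (arr.length : Int) 1).foldl
      (fun d i =>
        if !(d.contains (PySem.List.pyGetD arr i 0)) then d.insert (PySem.List.pyGetD arr i 0) 1
        else d.insert (PySem.List.pyGetD arr i 0) (d.getD (PySem.List.pyGetD arr i 0) 0 + 1))
      (PySem.Dict.empty : PySem.Dict Int Int) = PySem.Dict.counter arr := by
    rw [h1, h2, PySem.Dict.foldl_insert_getD_add_one_eq_counter]
  unfold all_modes
  exact congrArg (fun d => (PySem.List.sorted (PySem.Dict.items d) (fun t => t.2) true).map (fun t => t.1)) h3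

lemma all_modes_agree (arr : List Int) : all_modes arr = all_modes_alt arr := by
  cases harr : arr with
  | nil => rfl
  | cons a0 t0 =>
  rw [← harr]
  have hitems : (PySem.Dict.counter arr).items
      = (PySem.Set.ofList arr).map (fun k => (k, (List.count k arr : Int))) :=
    PySem.Dict.items_counter arr
  set items := (PySem.Dict.counter arr).items with hitems_def
  have hvalues : (PySem.Dict.counter arr).values = items.map (fun p => p.2) := rfl
  have hvne : items.map (fun p => p.2) ≠ [] := by
    have ha0 : a0 ∈ PySem.Set.ofList arr := (PySem.Set.mem_ofList arr a0).2 (by simp [harr])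
    have : (a0, (List.count a0 arr : Int)) ∈ items := by
      rw [hitems]; exact List.mem_map.2 ⟨a0, ha0, rfl⟩
    exact List.ne_nil_of_mem (List.mem_map.2 ⟨_, this, rfl⟩)
  obtain ⟨m, hm⟩ : ∃ m, PySem.List.max? (items.map (fun p => p.2)) (fun v => v) = some m := by
    cases h : PySem.List.max? (items.map (fun p => p.2)) (fun v => v) with
    | none => exact absurd ((PySem.List.max?_eq_none_iff _ _).1 h) hvne
    | some m => exact ⟨m, rfl⟩
  have hub : ∀ p ∈ items, p.2 ≤ m := fun p hp =>
    PySem.List.max?_isMax hm p.2 (List.mem_map.2 ⟨p, hp, rfl⟩)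
  have hpos : ∀ p ∈ items, 0 < p.2 := by
    intro p hp
    rw [hitems] at hp
    rcases List.mem_map.1 hp with ⟨k, hk, rfl⟩
    have : k ∈ arr := (PySem.Set.mem_ofList arr k).1 hk
    have := List.count_pos_iff.2 this
    simpa using this
  have hm1 : 1 ≤ m := by
    have := PySem.List.max?_mem hm
    rcases List.mem_map.1 this with ⟨p, hp, rfl⟩
    exact hpos p hp
  set ks := PySem.List.pyRange m 0 (-1) with hks_def
  have hks_pw : ks.Pairwise (· > ·) := by
    rw [hks_def, PySem.List.pyRange_neg_one_eq_reverse]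
    exact List.pairwise_reverse.2 (PySem.List.pairwise_lt_pyRange_one _ _)
  have hks_mem : ∀ p ∈ items, p.2 ∈ ks := by
    intro p hp
    rw [hks_def]
    exact PySem.List.mem_pyRange_neg_one.2 ⟨hpos p hp, hub p hp⟩
  -- A side
  have hA : all_modes arr
      = ks.flatMap (fun c => (items.filter (fun p => p.2 == c)).map (fun p => p.1)) := by
    rw [all_modes_eq_counter, ← hitems_def,
      sorted_rev_eq_flatMap items (fun t => t.2) ks hks_pw hks_mem, List.map_flatMap]
  -- B side
  have hB : all_modes_alt arr
      = ks.flatMap (fun c => (items.filter (fun p => p.2 == c)).map (fun p => p.1)) := by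
    simp only [all_modes_alt]
    rw [PySem.Dict.foldl_insert_getD_add_one_eq_counter, hvalues, hm]
    show (PySem.List.pyRange m 0 (-1)).foldl
        (fun res c => res ++
          (items.foldl (fun bs p => bs.set p.2.toNat (bs.getD p.2.toNat [] ++ [p.1]))
            (List.replicate (m + 1).toNat ([] : List Int))).getD c.toNat []) []
      = _
    rw [← hks_def, PySem.List.foldl_append_eq_flatMap, List.nil_append]
    apply List.flatMap_congr
    intro c hc
    have hc2 := PySem.List.mem_pyRange_neg_one.1 (hks_def ▸ hc)
    rw [bucket_fold items _ c (by omega)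
      (by rw [List.length_replicate]; omega)
      (fun p hp => ⟨le_of_lt (hpos p hp), by have := hub p hp; have := hpos p hp; rw [List.length_replicate]; omega⟩)]
    have h9 : (List.replicate (m + 1).toNat ([] : List Int)).getD c.toNat [] = [] := by
      rw [List.getD_eq_getElem?_getD, List.getElem?_replicate, if_pos (by omega)]
      rfl
    rw [h9, List.nil_append]
  rw [hA, hB]

-- ===== VERDICT (by name: the statement is the Claim_ definition above) =====
theorem all_modes_spec : Claim_equal_all_modes := by
  intro arr _
  exact all_modes_agree arr
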